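-- pv_equiv track=rewrite | github.com/alebarrod/ia_python_practice | IA_Excercises/final_project/decision_trees.py | train_classifier
-- ===== SOURCE A (Python) =====
-- def train_classifier(train,attributes):
--     save = {}
--
--     for index in range(0,len(attributes)):
--         save[attributes[index][0]] = []
--         for attrib in attributes[index][1]:
--             aux = {}
--             for row in train:
--
--                 if row[index] == attrib:
--                     if row[-1] in aux:
--                         aux[row[-1]] = aux[row[-1]]+1
--                     else:
--                         aux[row[-1]] = 1
--
--             save[attributes[index][0]].append((attrib,aux))
--     return save
-- ===== SOURCE B (Python) =====
-- def train_classifier(train, attributes):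
--     # One pass over the rows: per-attribute count dicts pre-initialized in
--     # definition order, then assembled into the same {name: [(value, counts)]} shape.
--     counts = [{value: {} for value in values} for _, values in attributes]
--     for row in train:
--         for i, cdict in enumerate(counts):
--             if cdict:
--                 aux = cdict.get(row[i])
--                 if aux is not None:
--                     label = row[-1]
--                     aux[label] = aux.get(label, 0) + 1
--     return {name: [(value, cdict[value]) for value in values]
--             for (name, values), cdict in zip(attributes, counts)}
-- ===== Notes on version B (the rewrite author's own statement) =====
-- stated objective: faster
-- what changed: Instead of rescanning all rows once per (attribute, value) pair, B makes a single pass over the rows, incrementing pre-initialized per-(attribute,value) counter dicts, and assembles the result afterwards.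
import Mathlib
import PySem

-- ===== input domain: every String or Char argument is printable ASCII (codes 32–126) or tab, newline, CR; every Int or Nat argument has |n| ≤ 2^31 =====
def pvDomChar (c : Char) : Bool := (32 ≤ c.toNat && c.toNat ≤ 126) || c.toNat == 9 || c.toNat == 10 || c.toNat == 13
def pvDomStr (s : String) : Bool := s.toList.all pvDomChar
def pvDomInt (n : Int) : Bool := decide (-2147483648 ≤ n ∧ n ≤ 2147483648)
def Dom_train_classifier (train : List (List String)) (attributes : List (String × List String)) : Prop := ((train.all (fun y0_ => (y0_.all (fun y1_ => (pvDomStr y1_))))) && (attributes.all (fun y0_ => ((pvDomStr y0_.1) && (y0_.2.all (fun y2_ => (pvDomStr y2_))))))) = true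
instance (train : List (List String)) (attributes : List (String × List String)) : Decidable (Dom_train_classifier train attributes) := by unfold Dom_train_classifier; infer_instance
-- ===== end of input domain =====

-- B replaces A's per-(attribute,value) rescans of the whole training set by a single pass
-- over the rows into pre-initialized per-(attribute,value) count dicts (faster; same result).

-- ===== PORT A =====
-- aux = {}; for row in train: if row[index] == attrib: count row[-1]   (the innermost loop of A)
def tcA_count (train : List (List String)) (index : Int) (attrib : String) : PySem.Dict String Int :=
  train.foldl (fun aux row =>
    if PySem.List.pyGetD row index "" == attrib then
      if aux.contains (PySem.List.pyGetD row (-1) "") then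
        aux.insert (PySem.List.pyGetD row (-1) "") (aux.getD (PySem.List.pyGetD row (-1) "") 0 + 1)
      else
        aux.insert (PySem.List.pyGetD row (-1) "") 1
    else aux) PySem.Dict.empty

def train_classifier (train : List (List String)) (attributes : List (String × List String)) : List (String × List (String × (List (String × Int)))) :=
  ((PySem.List.pyRange 0 (attributes.length : Int) 1).foldl (fun save index =>
      let att := PySem.List.pyGetD attributes index ("", [])
      -- save[attributes[index][0]] = []
      let save1 := save.insert att.1 ([] : List (String × List (String × Int)))
      -- for attrib in attributes[index][1]: … save[attributes[index][0]].append((attrib, aux))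
      att.2.foldl (fun s attrib =>
        s.insert att.1 (s.getD att.1 [] ++ [(attrib, (tcA_count train index attrib).items)])) save1)
    PySem.Dict.empty).items

-- ===== PORT B =====
-- aux = cdict.get(row[i]); if aux is not None: aux[label] = aux.get(label, 0) + 1
def tcB_cell (c : PySem.Dict String (PySem.Dict String Int)) (cell lab : String) : PySem.Dict String (PySem.Dict String Int) :=
  match c.get? cell with
  | some aux => c.insert cell (aux.insert lab (aux.getD lab 0 + 1))
  | none => c

-- for i, cdict in enumerate(counts): if cdict: …   (empty cdicts are skipped, row[i] unread there)
def tcB_row (cs : List (PySem.Dict String (PySem.Dict String Int))) (i : Nat) (row : List String) (lab : String) : List (PySem.Dict String (PySem.Dict String Int)) :=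
  match cs with
  | [] => []
  | c :: cs' =>
      (if c.items.isEmpty then c else tcB_cell c (PySem.List.pyGetD row (i : Int) "") lab)
        :: tcB_row cs' (i + 1) row lab

-- counts = [{value: {} for value in values} for _, values in attributes]
def tcB_init (attributes : List (String × List String)) : List (PySem.Dict String (PySem.Dict String Int)) :=
  attributes.map (fun a => a.2.foldl (fun d v => d.insert v (PySem.Dict.empty : PySem.Dict String Int)) PySem.Dict.empty)

def train_classifier_alt (train : List (List String)) (attributes : List (String × List String)) : List (String × List (String × (List (String × Int)))) :=
  let counts := train.foldl (fun cs row => tcB_row cs 0 row (PySem.List.pyGetD row (-1) "")) (tcB_init attributes)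
  ((attributes.zip counts).foldl (fun save p =>
     save.insert p.1.1 (p.1.2.map (fun v => (v, ((p.2).getD v PySem.Dict.empty).items)))) PySem.Dict.empty).items

-- ===== PRECONDITION & SPEC =====
-- Pre_ excludes exactly the inputs on which A raises IndexError (both programs raise there): a row
-- shorter than the position of an attribute whose value list is nonempty (A reads row[index] there).
def Pre_train_classifier (train : List (List String)) (attributes : List (String × List String)) : Prop :=
  ∀ j, j < attributes.length → (attributes.getD j ("", [])).2 ≠ [] → ∀ row ∈ train, j < row.length
instance (train : List (List String)) (attributes : List (String × List String)) : Decidable (Pre_train_classifier train attributes) := by unfold Pre_train_classifier; infer_instance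
def pvWitness_train_classifier : List (List String) × (List (String × List String)) :=
  ([["s", "h", "no"], ["s", "c", "yes"], ["r", "h", "yes"]], [("outlook", ["s", "r"]), ("temp", ["h", "c"])])

def Spec_train_classifier (train : List (List String)) (attributes : List (String × List String)) (out : List (String × List (String × (List (String × Int))))) : Prop := out = train_classifier_alt train attributes
instance (train : List (List String)) (attributes : List (String × List String)) (out : List (String × List (String × (List (String × Int))))) : Decidable (Spec_train_classifier train attributes out) := by unfold Spec_train_classifier; infer_instance

-- ===== CLAIM (what is proved, stated in full; the proofs are below) =====
def Claim_equal_train_classifier : Prop := ∀ (train : List (List String)) (attributes : List (String × List String)), Dom_train_classifier train attributes → Pre_train_classifier train attributes → Spec_train_classifier train attributes (train_classifier train attributes)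

-- ===== LEMMAS AND PROOFS =====

lemma tcA_inner_collapse (k : String) (g : String → List (String × Int))
    (vals : List String) :
    ∀ (s : PySem.Dict String (List (String × List (String × Int)))) (acc : List (String × List (String × Int))),
    vals.foldl (fun s attrib => s.insert k (s.getD k [] ++ [(attrib, g attrib)])) (s.insert k acc)
      = s.insert k (acc ++ vals.map (fun a => (a, g a))) := by
  induction vals with
  | nil => intro s acc; simp
  | cons a vs ih =>
    intro s acc
    simp only [List.foldl_cons, List.map_cons]
    rw [PySem.Dict.getD_insert_self, PySem.Dict.insert_insert_self, ih s (acc ++ [(a, g a)])]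
    simp

lemma tcA_step_eq (aux : PySem.Dict String Int) (lab : String) :
    (if aux.contains lab then aux.insert lab (aux.getD lab 0 + 1) else aux.insert lab 1)
      = aux.insert lab (aux.getD lab 0 + 1) := by
  by_cases h : aux.contains lab = true
  · simp [h]
  · simp only [Bool.not_eq_true] at h
    rw [if_neg (by simp [h]), PySem.Dict.getD_of_not_contains aux 0 h]; norm_num

lemma contains_tcB_cell (c : PySem.Dict String (PySem.Dict String Int)) (v lab a : String) :
    (tcB_cell c v lab).contains a = c.contains a := by
  unfold tcB_cell
  cases hg : c.get? v with
  | none => rfl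
  | some aux =>
    rw [PySem.Dict.contains_insert]
    by_cases hav : a = v
    · subst hav
      simp [PySem.Dict.contains_eq_isSome_get?, hg]
    · simp [hav]

lemma items_ne_nil_of_contains (c : PySem.Dict String (PySem.Dict String Int)) (a : String)
    (hc : c.contains a = true) : c.items.isEmpty = false := by
  rw [PySem.Dict.contains_eq_isSome_get?] at hc
  cases hg : c.get? a with
  | none => rw [hg] at hc; simp at hc
  | some v =>
    have hm := PySem.Dict.mem_items_of_get?_eq_some c hg
    cases hitems : c.items with
    | nil => rw [hitems] at hm; simp at hm
    | cons p l => simp [List.isEmpty_cons, hitems]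

lemma getD_tcB_cell (c : PySem.Dict String (PySem.Dict String Int)) (v lab a : String)
    (hc : c.contains a = true) :
    (tcB_cell c v lab).getD a PySem.Dict.empty
      = if v == a then (c.getD a PySem.Dict.empty).insert lab ((c.getD a PySem.Dict.empty).getD lab 0 + 1)
        else c.getD a PySem.Dict.empty := by
  unfold tcB_cell
  cases hg : c.get? v with
  | none =>
    have hva : (v == a) = false := by
      by_cases h : v = a
      · subst h; rw [PySem.Dict.contains_eq_isSome_get?, hg] at hc; simp at hc
      · simp [h]
    simp [hva]
  | some aux =>
    rw [PySem.Dict.getD_insert]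
    by_cases hav : a = v
    · subst hav
      rw [if_pos rfl, if_pos (by simp), PySem.Dict.getD_of_get?_eq_some _ _ hg]
    · rw [if_neg hav, if_neg (by simp [Ne.symm hav])]

lemma length_tcB_row (cs : List (PySem.Dict String (PySem.Dict String Int))) (row : List String) (lab : String) :
    ∀ (k : Nat), (tcB_row cs k row lab).length = cs.length := by
  induction cs with
  | nil => intro k; rfl
  | cons c cs ih => intro k; simp [tcB_row, ih]

lemma getD_tcB_row (cs : List (PySem.Dict String (PySem.Dict String Int))) (row : List String) (lab : String)
    (i : Nat) (hi : i < cs.length) (hr : i < row.length)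
    (hne : (cs.getD i PySem.Dict.empty).items.isEmpty = false) :
    ∀ (k : Nat),
    (tcB_row cs k row lab).getD i PySem.Dict.empty
      = tcB_cell (cs.getD i PySem.Dict.empty) (PySem.List.pyGetD row ((k + i : Nat) : Int) "") lab := by
  induction cs generalizing i with
  | nil => simp at hi
  | cons c cs ih =>
    intro k
    cases i with
    | zero =>
      simp only [List.getD_cons_zero] at hne ⊢
      simp [tcB_row, hne]
    | succ n =>
      simp only [List.getD_cons_succ] at hne ⊢
      simp only [tcB_row, List.getD_cons_succ]
      rw [ih n (by simpa using hi) (by omega) hne (k + 1), show k + 1 + n = k + (n + 1) by omega]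

lemma length_tcB_fold (train : List (List String)) :
    ∀ (cs : List (PySem.Dict String (PySem.Dict String Int))),
    (train.foldl (fun cs row => tcB_row cs 0 row (PySem.List.pyGetD row (-1) "")) cs).length = cs.length := by
  induction train with
  | nil => intro cs; rfl
  | cons r t ih => intro cs; simp only [List.foldl_cons]; rw [ih, length_tcB_row]

lemma proj_tcB_fold (train : List (List String)) (i : Nat) (a : String) :
    ∀ (cs : List (PySem.Dict String (PySem.Dict String Int))),
      i < cs.length → ((cs.getD i PySem.Dict.empty).contains a = true) →
      (∀ row ∈ train, i < row.length) →
      ((train.foldl (fun cs row => tcB_row cs 0 row (PySem.List.pyGetD row (-1) "")) cs).getD i PySem.Dict.empty).getD a PySem.Dict.empty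
        = train.foldl (fun aux row =>
            if row.getD i "" == a then
              aux.insert (PySem.List.pyGetD row (-1) "") (aux.getD (PySem.List.pyGetD row (-1) "") 0 + 1)
            else aux) ((cs.getD i PySem.Dict.empty).getD a PySem.Dict.empty) := by
  induction train with
  | nil => intro cs _ _ _; rfl
  | cons r t ih =>
    intro cs hi hc hrow
    simp only [List.foldl_cons]
    have hr : i < r.length := hrow r (List.mem_cons_self ..)
    have hgd : (tcB_row cs 0 r (PySem.List.pyGetD r (-1) "")).getD i PySem.Dict.empty
        = tcB_cell (cs.getD i PySem.Dict.empty) (PySem.List.pyGetD r ((0 + i : Nat) : Int) "") (PySem.List.pyGetD r (-1) "") :=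
      getD_tcB_row cs r _ i hi hr (items_ne_nil_of_contains _ a hc) 0
    rw [ih _ (by rw [length_tcB_row]; exact hi)
          (by rw [hgd, contains_tcB_cell]; exact hc)
          (fun row hm => hrow row (List.mem_cons_of_mem _ hm))]
    rw [hgd, getD_tcB_cell _ _ _ _ hc]
    rw [show (0 + i : Nat) = i by omega, PySem.List.pyGetD_natCast]

lemma tcA_count_eq_fold (train : List (List String)) (i : Nat) (a : String) :
    tcA_count train (i : Int) a
      = train.foldl (fun aux row =>
          if row.getD i "" == a then
            aux.insert (PySem.List.pyGetD row (-1) "") (aux.getD (PySem.List.pyGetD row (-1) "") 0 + 1)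
          else aux) PySem.Dict.empty := by
  unfold tcA_count
  congr 1
  funext aux row
  rw [PySem.List.pyGetD_natCast]
  by_cases h : (row.getD i "" == a) = true
  · rw [if_pos h, if_pos h, tcA_step_eq]
  · rw [if_neg h, if_neg h]

lemma getD_tcB_init (attributes : List (String × List String)) (i : Nat) (hi : i < attributes.length) :
    (tcB_init attributes).getD i PySem.Dict.empty
      = (attributes.getD i ("", [])).2.foldl (fun d v => d.insert v (PySem.Dict.empty : PySem.Dict String Int)) PySem.Dict.empty := by
  unfold tcB_init
  rw [List.getD_eq_getElem?_getD, List.getElem?_map, List.getElem?_eq_getElem hi,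
      List.getD_eq_getElem?_getD, List.getElem?_eq_getElem hi]
  rfl

lemma getD_init_vals (vals : List String) (a : String) :
    ∀ (d : PySem.Dict String (PySem.Dict String Int)), d.getD a PySem.Dict.empty = PySem.Dict.empty →
    (vals.foldl (fun d v => d.insert v (PySem.Dict.empty : PySem.Dict String Int)) d).getD a PySem.Dict.empty = PySem.Dict.empty := by
  induction vals with
  | nil => intro d h; exact h
  | cons v vs ih =>
    intro d h
    refine ih _ ?_
    rw [PySem.Dict.getD_insert]
    split_ifs with hav
    · rfl
    · exact h

lemma contains_init_vals (vals : List String) (a : String) (ha : a ∈ vals) :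
    ∀ (d : PySem.Dict String (PySem.Dict String Int)),
    (vals.foldl (fun d v => d.insert v (PySem.Dict.empty : PySem.Dict String Int)) d).contains a = true := by
  have keep : ∀ (l : List String) (d : PySem.Dict String (PySem.Dict String Int)), d.contains a = true →
      (l.foldl (fun d v => d.insert v (PySem.Dict.empty : PySem.Dict String Int)) d).contains a = true := by
    intro l
    induction l with
    | nil => intro d h; exact h
    | cons v vs ih =>
      intro d h
      exact ih _ (by rw [PySem.Dict.contains_insert, h]; simp)
  induction vals with
  | nil => simp at ha
  | cons v vs ih =>
    intro d
    rcases List.mem_cons.mp ha with h | h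
    · subst h
      exact keep vs _ (by rw [PySem.Dict.contains_insert]; simp)
    · exact ih h _

lemma per_attr_eq (train : List (List String)) (attributes : List (String × List String))
    (hpre : Pre_train_classifier train attributes) (j : Nat) (hj : j < attributes.length) :
    (attributes.getD j ("", [])).2.map (fun a => (a, (tcA_count train (j : Int) a).items))
      = (attributes.getD j ("", [])).2.map (fun v => (v,
          (((train.foldl (fun cs row => tcB_row cs 0 row (PySem.List.pyGetD row (-1) "")) (tcB_init attributes)).getD j PySem.Dict.empty).getD v PySem.Dict.empty).items)) := by
  apply List.map_congr_left
  intro a ha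
  have hrow : ∀ row ∈ train, j < row.length :=
    hpre j hj (List.ne_nil_of_mem ha)
  have hlen : j < (tcB_init attributes).length := by
    unfold tcB_init; simpa using hj
  have hcont : ((tcB_init attributes).getD j PySem.Dict.empty).contains a = true := by
    rw [getD_tcB_init attributes j hj]
    exact contains_init_vals _ a ha _
  have hinit : ((tcB_init attributes).getD j PySem.Dict.empty).getD a PySem.Dict.empty = PySem.Dict.empty := by
    rw [getD_tcB_init attributes j hj]
    exact getD_init_vals _ a _ rfl
  rw [proj_tcB_fold train j a (tcB_init attributes) hlen hcont hrow, hinit,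
      tcA_count_eq_fold]

lemma outer_fold (train : List (List String)) (attributes : List (String × List String)) :
    ∀ (ats : List (String × List String)) (cts : List (PySem.Dict String (PySem.Dict String Int))) (k : Nat)
      (save : PySem.Dict String (List (String × List (String × Int)))),
      ats.length = cts.length →
      (∀ j, j < ats.length → PySem.List.pyGetD attributes ((k + j : Nat) : Int) ("", []) = ats.getD j ("", [])) →
      (∀ j, j < ats.length →
        (ats.getD j ("", [])).2.map (fun a => (a, (tcA_count train ((k + j : Nat) : Int) a).items))
          = (ats.getD j ("", [])).2.map (fun v => (v, (((cts.getD j PySem.Dict.empty)).getD v PySem.Dict.empty).items))) →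
      (PySem.List.pyRange (k : Int) ((k : Int) + ats.length) 1).foldl (fun save index =>
          let att := PySem.List.pyGetD attributes index ("", [])
          let save1 := save.insert att.1 ([] : List (String × List (String × Int)))
          att.2.foldl (fun s attrib =>
            s.insert att.1 (s.getD att.1 [] ++ [(attrib, (tcA_count train index attrib).items)])) save1) save
        = (ats.zip cts).foldl (fun save p =>
            save.insert p.1.1 (p.1.2.map (fun v => (v, ((p.2).getD v PySem.Dict.empty).items)))) save := by
  intro ats
  induction ats with
  | nil =>
    intro cts k save _ _ _
    rw [show ((k : Int) + (([] : List (String × List String)).length : Int)) = (k : Int) by simp,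
        PySem.List.pyRange_one_eq_nil le_rfl]
    simp
  | cons p ats ih =>
    intro cts k save hlen hats hlist
    cases cts with
    | nil => simp at hlen
    | cons c cts' =>
      have hatt : PySem.List.pyGetD attributes (k : Int) ("", []) = p := by
        have h := hats 0 (by simp)
        simpa using h
      have hlist0 : p.2.map (fun a => (a, (tcA_count train (k : Int) a).items))
          = p.2.map (fun v => (v, (c.getD v PySem.Dict.empty).items)) := by
        have h := hlist 0 (by simp)
        simpa using h
      rw [PySem.List.pyRange_one_cons
            (by rw [List.length_cons]; push_cast; omega)]
      simp only [List.foldl_cons, List.zip_cons_cons]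
      rw [hatt]
      rw [tcA_inner_collapse p.1 (fun a => (tcA_count train (k : Int) a).items) p.2 save []]
      simp only [List.nil_append]
      rw [hlist0]
      rw [show ((k : Int) + 1) = (((k + 1 : Nat)) : Int) by push_cast; ring,
          show ((k : Int) + (((p :: ats) : List (String × List String)).length : Int)) = (((k + 1 : Nat) : Int) + (ats.length : Int)) by rw [List.length_cons]; push_cast; ring]
      refine ih cts' (k + 1) _ (by simpa using hlen) ?_ ?_
      · intro j hj
        have h := hats (j + 1) (by simpa using Nat.succ_lt_succ hj)
        rw [show k + 1 + j = k + (j + 1) by omega]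
        simpa using h
      · intro j hj
        have h := hlist (j + 1) (by simpa using Nat.succ_lt_succ hj)
        rw [show k + 1 + j = k + (j + 1) by omega]
        simpa using h

-- ===== VERDICT (by name: the statement is the Claim_ definition above) =====
theorem train_classifier_spec : Claim_equal_train_classifier := by
  intro train attributes _ hpre
  unfold Spec_train_classifier train_classifier train_classifier_alt
  refine congrArg PySem.Dict.items ?_
  have hlen : attributes.length
      = (train.foldl (fun cs row => tcB_row cs 0 row (PySem.List.pyGetD row (-1) "")) (tcB_init attributes)).length := by
    rw [length_tcB_fold]
    unfold tcB_init
    simp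
  have hout := outer_fold train attributes attributes
      (train.foldl (fun cs row => tcB_row cs 0 row (PySem.List.pyGetD row (-1) "")) (tcB_init attributes))
      0 PySem.Dict.empty hlen
      (by intro j hj; rw [PySem.List.pyGetD_natCast]; simp)
      (by intro j hj
          have h := per_attr_eq train attributes hpre j hj
          simpa using h)
  simpa using hout
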